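-- pv_equiv track=rewrite | github.com/Matheusrsm/Graduacao-CC | Programação 1/Atividades-LP1/Unidade 6/ordena/ordena.py | ordena_tipos
-- ===== SOURCE A (Python) =====
-- def ordena_tipos(lista):
--     numeros = []
--     alphas = []
--     alphanumericos = []
--     for i in range(len(lista)):
--         if lista[i].isdigit():
--             numeros.append(lista[i])
--         elif lista[i].isalpha():
--             alphas.append(lista[i])
--         else:
--             alphanumericos.append(lista[i])
--     return numeros + alphas + alphanumericos
-- ===== SOURCE B (Python) =====
-- # B: three independent filtering passes, one per bucket (idiomatic decomposition).
-- def ordena_tipos(lista):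
--     numeros = [x for x in lista if x.isdigit()]
--     alphas = [x for x in lista if x.isalpha()]
--     others = [x for x in lista if not x.isdigit() and not x.isalpha()]
--     return numeros + alphas + others
-- ===== Notes on version B (the rewrite author's own statement) =====
-- stated objective: idiomatic
-- what changed: Replaces the single index loop that appends into three mutable buckets with three independent filtering passes over the list, one comprehension per bucket, concatenated at the end.
import Mathlib
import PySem

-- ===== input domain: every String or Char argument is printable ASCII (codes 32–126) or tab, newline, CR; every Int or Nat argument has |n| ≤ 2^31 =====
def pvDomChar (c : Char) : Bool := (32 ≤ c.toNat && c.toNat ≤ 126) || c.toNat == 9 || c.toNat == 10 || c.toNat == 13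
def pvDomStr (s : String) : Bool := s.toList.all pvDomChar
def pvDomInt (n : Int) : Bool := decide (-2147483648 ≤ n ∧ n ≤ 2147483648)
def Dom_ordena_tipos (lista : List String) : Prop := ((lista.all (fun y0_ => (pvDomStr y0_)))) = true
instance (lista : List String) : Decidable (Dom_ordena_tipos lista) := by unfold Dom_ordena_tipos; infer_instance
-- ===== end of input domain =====

-- B changes A's single bucket-appending loop into three independent filtering passes (idiomatic decomposition); same values.

-- ===== PORT A =====
-- A: one loop over indices, appending each element into one of three accumulator lists (the loop body, named).
def pvStepA (lista : List String) (st : List String × List String × List String) (i : Nat) :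
    List String × List String × List String :=
  let x := (PySem.List.pyGet? lista (Int.ofNat i)).getD ""   -- i ∈ range(len), always in range
  if PySem.Str.strIsdigit x then (st.1 ++ [x], st.2.1, st.2.2)
  else if PySem.Str.strIsalpha x then (st.1, st.2.1 ++ [x], st.2.2)
  else (st.1, st.2.1, st.2.2 ++ [x])

def ordena_tipos (lista : List String) : List String :=
  let st := (List.range lista.length).foldl (pvStepA lista) ([], [], [])
  st.1 ++ st.2.1 ++ st.2.2

-- ===== PORT B =====
-- B: three filter passes, one per bucket.
def ordena_tipos_alt (lista : List String) : List String :=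
  (lista.filter (fun x => PySem.Str.strIsdigit x)) ++
  (lista.filter (fun x => PySem.Str.strIsalpha x)) ++
  (lista.filter (fun x => !PySem.Str.strIsdigit x && !PySem.Str.strIsalpha x))

-- ===== PRECONDITION & SPEC =====
def Spec_ordena_tipos (lista : List String) (out : List String) : Prop := out = ordena_tipos_alt lista
instance (lista : List String) (out : List String) : Decidable (Spec_ordena_tipos lista out) := by unfold Spec_ordena_tipos; infer_instance

-- ===== CLAIM (what is proved, stated in full; the proofs are below) =====
def Claim_equal_ordena_tipos : Prop := ∀ (lista : List String), Dom_ordena_tipos lista → Spec_ordena_tipos lista (ordena_tipos lista)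

-- ===== LEMMAS AND PROOFS =====

-- A Python str cannot be both .isdigit() and .isalpha().
lemma pvChar_digit_not_alpha (c : Char) :
    PySem.Chars.isdigit c = true → PySem.Chars.isalpha c = false := by
  simp only [PySem.Chars.isdigit, PySem.Chars.isalpha, PySem.Chars.isupper, PySem.Chars.islower,
    Bool.and_eq_true, Bool.or_eq_false_iff, Bool.and_eq_false_iff, decide_eq_true_eq,
    decide_eq_false_iff_not, Char.le_def, UInt32.le_iff_toNat_le,
    show ('0'.val.toNat = 48) from rfl, show ('9'.val.toNat = 57) from rfl,
    show ('A'.val.toNat = 65) from rfl, show ('Z'.val.toNat = 90) from rfl,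
    show ('a'.val.toNat = 97) from rfl, show ('z'.val.toNat = 122) from rfl]
  intro h1
  omega

lemma pvStr_digit_not_alpha (s : String) :
    PySem.Chars.strIsdigit s.toList = true → PySem.Chars.strIsalpha s.toList = false := by
  simp only [PySem.Chars.strIsdigit, PySem.Chars.strIsalpha, Bool.and_eq_true,
    Bool.and_eq_false_iff, List.all_eq_true]
  intro ⟨hne, hall⟩
  cases h : s.toList with
  | nil => simp [h] at hne
  | cons c cs =>
    right
    simp only [List.all_cons, Bool.and_eq_false_iff]
    left
    exact pvChar_digit_not_alpha c (hall c (by rw [h]; exact List.mem_cons_self))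

lemma pvGet_in_range (lista : List String) (i : Nat) (h : i < lista.length) :
    (PySem.List.pyGet? lista (Int.ofNat i)).getD "" = lista[i] := by
  simp [PySem.List.pyGet?, PySem.List.pyIdx?, h]

lemma pvFoldA_inv (lista : List String) (n : Nat) (hn : n ≤ lista.length)
    (a b c : List String) :
    (List.range n).foldl (pvStepA lista) (a, b, c) =
      (a ++ (lista.take n).filter (fun x => PySem.Str.strIsdigit x),
       b ++ (lista.take n).filter (fun x => PySem.Str.strIsalpha x),
       c ++ (lista.take n).filter (fun x => !PySem.Str.strIsdigit x && !PySem.Str.strIsalpha x)) := by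
  induction n generalizing a b c with
  | zero => simp
  | succ m ih =>
    have hm : m < lista.length := hn
    rw [List.range_succ, List.foldl_append, ih (Nat.le_of_lt hm)]
    have htake : lista.take (m+1) = lista.take m ++ [lista[m]] :=
      List.take_succ_eq_append_getElem hm
    simp only [List.foldl_cons, List.foldl_nil, pvStepA, pvGet_in_range lista m hm, htake,
      List.filter_append, List.filter_cons, List.filter_nil]
    split_ifs with h1 h2 <;>
      first
        | (have := pvStr_digit_not_alpha lista[m] h1
           simp_all)
        | simp_all

-- ===== VERDICT (by name: the statement is the Claim_ definition above) =====
theorem ordena_tipos_spec : Claim_equal_ordena_tipos := by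
  intro lista _
  show ordena_tipos lista = ordena_tipos_alt lista
  unfold ordena_tipos ordena_tipos_alt
  rw [pvFoldA_inv lista lista.length (le_refl _) [] [] []]
  simp
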